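-- pv_equiv track=rewrite | github.com/SujiGayatri/GFG | Difficulty: Basic/Absolute Difference of 1/absolute-difference-of-1.py | getDigitDiff1AndLessK
-- ===== SOURCE A (Python) =====
-- def getDigitDiff1AndLessK(arr, k):
--     # code here
--     res = []
--     for i in arr:
--         if i < k and i >= 10:
--             temp = i
--             prev = temp % 10
--             temp //= 10
--             valid = True
--
--             while temp > 0:
--                 curr = temp % 10
--                 if abs(curr - prev) != 1:
--                     valid = False
--                     break
--                 prev = curr
--                 temp //= 10
--
--             if valid:
--                 res.append(i)
--     return res
-- ===== SOURCE B (Python) =====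
-- def getDigitDiff1AndLessK(arr, k):
--     # Precompute the set of all "step numbers" (adjacent digits differ by 1)
--     # that are >= 10 and < k, by expanding the digit graph from seeds 1..9,
--     # then keep the array elements that belong to that set.
--     def gen(x):
--         if x >= k:
--             return []
--         out = [x] if x >= 10 else []
--         d = x % 10
--         if d - 1 >= 0:
--             out += gen(10 * x + (d - 1))
--         if d + 1 <= 9:
--             out += gen(10 * x + (d + 1))
--         return out
--     valid = set()
--     for s0 in range(1, 10):
--         valid.update(gen(s0))
--     return [i for i in arr if i in valid]
-- ===== Notes on version B (the rewrite author's own statement) =====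
-- stated objective: alternative
-- what changed: Instead of digit-scanning every array element, B enumerates once all step numbers in [10,k) by expanding the digit graph from seeds 1..9 (appending last digit +/-1), collects them in a set, and filters the array by membership.
import Mathlib
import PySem

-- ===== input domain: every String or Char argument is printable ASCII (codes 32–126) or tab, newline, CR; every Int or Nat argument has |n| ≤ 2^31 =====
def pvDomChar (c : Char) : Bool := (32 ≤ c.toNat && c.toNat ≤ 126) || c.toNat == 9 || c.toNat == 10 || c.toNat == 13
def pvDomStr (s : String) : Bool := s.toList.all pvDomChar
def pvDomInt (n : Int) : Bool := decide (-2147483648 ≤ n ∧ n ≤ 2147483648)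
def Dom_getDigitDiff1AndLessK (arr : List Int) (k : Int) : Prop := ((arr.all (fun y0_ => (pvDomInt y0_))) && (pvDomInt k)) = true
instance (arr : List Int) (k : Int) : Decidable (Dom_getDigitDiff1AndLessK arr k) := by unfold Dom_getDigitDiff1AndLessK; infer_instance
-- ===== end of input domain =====

-- B replaces A's per-element digit scan by one digit-graph expansion of all
-- valid "step numbers" below k (seeds 1..9, append last-digit±1), then filters
-- the array by set membership: an alternative algorithm of similar cost.


-- ===== PORT A =====
-- A's 'while temp > 0' loop with its state (prev, temp), written with a Nat
-- fuel so it is structural; fuel = temp.toNat always suffices (aLoopF_congr).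
def aLoopF : Nat → Int → Int → Bool
  | 0, _, _ => true
  | f + 1, prev, temp =>
    if 0 < temp then
      let curr := PySem.Int.mod temp 10
      if (curr - prev).natAbs ≠ 1 then false
      else aLoopF f curr (PySem.Int.floordiv temp 10)
    else true

def aLoop (prev temp : Int) : Bool := aLoopF temp.toNat prev temp

-- A's per-element body: prev = i % 10; temp = i // 10; then the while loop
def aCheck (i : Int) : Bool := aLoop (PySem.Int.mod i 10) (PySem.Int.floordiv i 10)

def getDigitDiff1AndLessK (arr : List Int) (k : Int) : List Int :=
  arr.foldl (fun res i =>
    if i < k ∧ 10 ≤ i then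
      if aCheck i then res ++ [i] else res
    else res) []

-- ===== PORT B =====
-- Source B's gen(x): all valid numbers (≥ 10, < k) reachable from the digit prefix
-- x by appending digits last±1.  Written with a Nat fuel so it is structural;
-- the '1 ≤ x' conjunct is an invariant of gen's call sites (seeds 1..9,
-- children 10*x+e ≥ 10) and fuel = (k-x).toNat always suffices (genBF_congr).
def genBF : Nat → Int → Int → List Int
  | 0, _, _ => []
  | f + 1, k, x =>
    if 1 ≤ x ∧ x < k then
      (if 10 ≤ x then [x] else []) ++
      (if 0 ≤ PySem.Int.mod x 10 - 1 then
          genBF f k (10 * x + (PySem.Int.mod x 10 - 1)) else []) ++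
      (if PySem.Int.mod x 10 + 1 ≤ 9 then
          genBF f k (10 * x + (PySem.Int.mod x 10 + 1)) else [])
    else []

def genB (k x : Int) : List Int := genBF (k - x).toNat k x

def getDigitDiff1AndLessK_alt (arr : List Int) (k : Int) : List Int :=
  let valid : PySem.Set Int :=
    (PySem.List.pyRange 1 10 1).foldl
      (fun s s0 => PySem.Set.update s (genB k s0)) PySem.Set.empty
  arr.filter (fun i => PySem.Set.contains valid i)

-- ===== PRECONDITION & SPEC =====
def Spec_getDigitDiff1AndLessK (arr : List Int) (k : Int) (out : List Int) : Prop := out = getDigitDiff1AndLessK_alt arr k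
instance (arr : List Int) (k : Int) (out : List Int) : Decidable (Spec_getDigitDiff1AndLessK arr k out) := by unfold Spec_getDigitDiff1AndLessK; infer_instance

-- ===== CLAIM (what is proved, stated in full; the proofs are below) =====
def Claim_equal_getDigitDiff1AndLessK : Prop := ∀ (arr : List Int) (k : Int), Dom_getDigitDiff1AndLessK arr k → Spec_getDigitDiff1AndLessK arr k (getDigitDiff1AndLessK arr k)

-- ===== LEMMAS AND PROOFS =====

theorem pv_mod10_nonneg (x : Int) : 0 ≤ PySem.Int.mod x 10 := by
  rw [PySem.Int.mod_eq_emod_of_pos (by omega)]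
  exact Int.emod_nonneg x (by omega)

theorem pv_mod10_le (x : Int) : PySem.Int.mod x 10 ≤ 9 := by
  rw [PySem.Int.mod_eq_emod_of_pos (by omega)]
  have := Int.emod_lt_of_pos x (b := 10) (by omega)
  omega

theorem pv_div10_lt (temp : Int) (h : 0 < temp) :
    (PySem.Int.floordiv temp 10).toNat < temp.toNat ∧ 0 ≤ PySem.Int.floordiv temp 10 := by
  rw [PySem.Int.floordiv_eq_ediv_of_pos (by omega)]
  have := Int.mul_ediv_add_emod temp 10
  have := Int.emod_nonneg temp (show (10:Int) ≠ 0 by omega)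
  have := Int.emod_lt_of_pos temp (show (0:Int) < 10 by omega)
  omega

-- enough fuel makes aLoopF independent of the fuel
theorem aLoopF_congr : ∀ (f1 f2 : Nat) (prev temp : Int),
    temp.toNat ≤ f1 → temp.toNat ≤ f2 → aLoopF f1 prev temp = aLoopF f2 prev temp := by
  intro f1
  induction f1 with
  | zero =>
    intro f2 prev temp h1 h2
    have ht : ¬ 0 < temp := by omega
    cases f2 with
    | zero => rfl
    | succ f2 => simp [aLoopF, ht]
  | succ f1 ih =>
    intro f2 prev temp h1 h2
    by_cases ht : 0 < temp
    · cases f2 with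
      | zero => omega
      | succ f2 =>
        simp only [aLoopF, if_pos ht]
        have hd := pv_div10_lt temp ht
        rw [ih f2 _ (PySem.Int.floordiv temp 10) (by omega) (by omega)]
    · cases f2 with
      | zero => cases f1 <;> simp [aLoopF, ht]
      | succ f2 => simp [aLoopF, ht]

theorem aLoop_unfold (prev temp : Int) :
    aLoop prev temp =
      if 0 < temp then
        (if (PySem.Int.mod temp 10 - prev).natAbs ≠ 1 then false
         else aLoop (PySem.Int.mod temp 10) (PySem.Int.floordiv temp 10))
      else true := by
  unfold aLoop
  by_cases ht : 0 < temp
  · rw [if_pos ht]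
    obtain ⟨n, hn⟩ : ∃ n, temp.toNat = n + 1 := ⟨temp.toNat - 1, by omega⟩
    rw [hn]
    simp only [aLoopF, if_pos ht]
    have hd := pv_div10_lt temp ht
    rw [aLoopF_congr n (PySem.Int.floordiv temp 10).toNat _ (PySem.Int.floordiv temp 10)
      (by omega) le_rfl]
  · rw [if_neg ht]
    have h0 : temp.toNat = 0 := by omega
    rw [h0]
    rfl

theorem pv_mod10 (x e : Int) (he : 0 ≤ e) (he9 : e ≤ 9) :
    PySem.Int.mod (10 * x + e) 10 = e := by
  rw [PySem.Int.mod_eq_emod_of_pos (by omega)]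
  omega

theorem pv_div10 (x e : Int) (he : 0 ≤ e) (he9 : e ≤ 9) :
    PySem.Int.floordiv (10 * x + e) 10 = x := by
  rw [PySem.Int.floordiv_eq_ediv_of_pos (by omega)]
  omega

-- unfolding aCheck on a child 10*x+e
theorem aCheck_child (x e : Int) (hx : 1 ≤ x) (he : 0 ≤ e) (he9 : e ≤ 9) :
    aCheck (10 * x + e) =
      (decide ((PySem.Int.mod x 10 - e).natAbs = 1) && aCheck x) := by
  unfold aCheck
  rw [pv_mod10 x e he he9, pv_div10 x e he he9]
  rw [aLoop_unfold]
  rw [if_pos (show 0 < x by omega)]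
  by_cases h : (PySem.Int.mod x 10 - e).natAbs = 1 <;> simp [h]

theorem aCheck_single (x : Int) (h1 : 1 ≤ x) (h9 : x ≤ 9) : aCheck x = true := by
  unfold aCheck
  have hz : PySem.Int.floordiv x 10 = 0 := by
    rw [PySem.Int.floordiv_eq_ediv_of_pos (by omega)]
    omega
  rw [hz, aLoop_unfold]
  simp

-- enough fuel makes genBF independent of the fuel
theorem genBF_congr : ∀ (f1 f2 : Nat) (k x : Int),
    (k - x).toNat ≤ f1 → (k - x).toNat ≤ f2 → genBF f1 k x = genBF f2 k x := by
  intro f1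
  induction f1 with
  | zero =>
    intro f2 k x h1 h2
    have hg : ¬ (1 ≤ x ∧ x < k) := by omega
    cases f2 with
    | zero => rfl
    | succ f2 => simp [genBF, hg]
  | succ f1 ih =>
    intro f2 k x h1 h2
    by_cases hg : 1 ≤ x ∧ x < k
    · obtain ⟨hx1, hxk⟩ := hg
      cases f2 with
      | zero => omega
      | succ f2 =>
        have hd0 := pv_mod10_nonneg x
        have hd9 := pv_mod10_le x
        simp only [genBF, if_pos (⟨hx1, hxk⟩ : 1 ≤ x ∧ x < k)]
        rw [ih f2 k (10 * x + (PySem.Int.mod x 10 - 1)) (by omega) (by omega)]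
        rw [ih f2 k (10 * x + (PySem.Int.mod x 10 + 1)) (by omega) (by omega)]
    · cases f2 with
      | zero => cases f1 <;> simp [genBF, hg]
      | succ f2 => simp [genBF, hg]

theorem genB_unfold (k x : Int) :
    genB k x =
      if 1 ≤ x ∧ x < k then
        (if 10 ≤ x then [x] else []) ++
        (if 0 ≤ PySem.Int.mod x 10 - 1 then
            genB k (10 * x + (PySem.Int.mod x 10 - 1)) else []) ++
        (if PySem.Int.mod x 10 + 1 ≤ 9 then
            genB k (10 * x + (PySem.Int.mod x 10 + 1)) else [])
      else [] := by
  unfold genB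
  by_cases hg : 1 ≤ x ∧ x < k
  · rw [if_pos hg]
    obtain ⟨hx1, hxk⟩ := hg
    obtain ⟨n, hn⟩ : ∃ n, (k - x).toNat = n + 1 := ⟨(k - x).toNat - 1, by omega⟩
    rw [hn]
    have hd0 := pv_mod10_nonneg x
    have hd9 := pv_mod10_le x
    simp only [genBF, if_pos (⟨hx1, hxk⟩ : 1 ≤ x ∧ x < k)]
    rw [genBF_congr n (k - (10 * x + (PySem.Int.mod x 10 - 1))).toNat k
      (10 * x + (PySem.Int.mod x 10 - 1)) (by omega) le_rfl]
    rw [genBF_congr n (k - (10 * x + (PySem.Int.mod x 10 + 1))).toNat k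
      (10 * x + (PySem.Int.mod x 10 + 1)) (by omega) le_rfl]
  · rw [if_neg hg]
    cases h0 : (k - x).toNat with
    | zero => rfl
    | succ m => simp [genBF, hg]

-- soundness: everything gen produces is a valid number in [10, k)
theorem genB_sound_aux (k : Int) :
    ∀ n (x : Int), (k - x).toNat = n → 1 ≤ x → aCheck x = true →
      ∀ z ∈ genB k x, 10 ≤ z ∧ z < k ∧ aCheck z = true := by
  intro n
  induction n using Nat.strong_induction_on with
  | _ n ih =>
    intro x hn hx hv z hz
    by_cases hk : x < k
    · rw [genB_unfold, if_pos ⟨hx, hk⟩] at hz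
      have hd0 := pv_mod10_nonneg x
      have hd9 := pv_mod10_le x
      simp only [List.mem_append] at hz
      rcases hz with (hz | hz) | hz
      · by_cases h10 : 10 ≤ x
        · rw [if_pos h10] at hz
          simp only [List.mem_singleton] at hz
          subst hz
          exact ⟨h10, hk, hv⟩
        · rw [if_neg h10] at hz; simp at hz
      · by_cases hg : 0 ≤ PySem.Int.mod x 10 - 1
        · rw [if_pos hg] at hz
          have hch : aCheck (10 * x + (PySem.Int.mod x 10 - 1)) = true := by
            rw [aCheck_child x _ hx hg (by omega)]
            simp [hv]
          exact ih (k - (10 * x + (PySem.Int.mod x 10 - 1))).toNat (by omega)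
            _ rfl (by omega) hch z hz
        · rw [if_neg hg] at hz; simp at hz
      · by_cases hg : PySem.Int.mod x 10 + 1 ≤ 9
        · rw [if_pos hg] at hz
          have hch : aCheck (10 * x + (PySem.Int.mod x 10 + 1)) = true := by
            rw [aCheck_child x _ hx (by omega) hg]
            simp [hv]
          exact ih (k - (10 * x + (PySem.Int.mod x 10 + 1))).toNat (by omega)
            _ rfl (by omega) hch z hz
        · rw [if_neg hg] at hz; simp at hz
    · rw [genB_unfold, if_neg (by omega)] at hz
      simp at hz

theorem genB_sound (k x : Int) (hx : 1 ≤ x) (hv : aCheck x = true) :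
    ∀ z ∈ genB k x, 10 ≤ z ∧ z < k ∧ aCheck z = true :=
  genB_sound_aux k (k - x).toNat x rfl hx hv

-- a child's subtree is contained in the parent's
theorem genB_child_subset (k x e : Int) (hx : 1 ≤ x) (hk : x < k)
    (he : (e = PySem.Int.mod x 10 - 1 ∧ 0 ≤ e) ∨
          (e = PySem.Int.mod x 10 + 1 ∧ e ≤ 9)) :
    ∀ z ∈ genB k (10 * x + e), z ∈ genB k x := by
  intro z hz
  rw [genB_unfold, if_pos ⟨hx, hk⟩]
  simp only [List.mem_append]
  rcases he with ⟨rfl, hg⟩ | ⟨rfl, hg⟩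
  · left; right; rw [if_pos hg]; exact hz
  · right; rw [if_pos hg]; exact hz

-- completeness: every valid number in [10, k) appears in some seed's subtree
theorem genB_complete (k : Int) :
    ∀ n (z : Int), z.toNat = n → 1 ≤ z → z < k → aCheck z = true →
      ∃ s0, 1 ≤ s0 ∧ s0 ≤ 9 ∧
        (∀ w ∈ genB k z, w ∈ genB k s0) ∧ (10 ≤ z → z ∈ genB k s0) := by
  intro n
  induction n using Nat.strong_induction_on with
  | _ n ih =>
    intro z hn h1 hk hv
    by_cases hz9 : z ≤ 9
    · exact ⟨z, h1, hz9, fun w hw => hw, by omega⟩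
    · have hz10 : 10 ≤ z := by omega
      set x := PySem.Int.floordiv z 10 with hxdef
      set e := PySem.Int.mod z 10 with hedef
      have hxe : z = 10 * x + e := by
        rw [hxdef, hedef, PySem.Int.floordiv_eq_ediv_of_pos (by omega),
            PySem.Int.mod_eq_emod_of_pos (by omega)]
        omega
      have hx1 : 1 ≤ x := by
        rw [hxdef, PySem.Int.floordiv_eq_ediv_of_pos (by omega)]
        omega
      have he0 : 0 ≤ e := hedef ▸ pv_mod10_nonneg z
      have he9 : e ≤ 9 := hedef ▸ pv_mod10_le z
      have hxlt : x < z := by omega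
      have hvz : aCheck z = true := hv
      rw [hxe, aCheck_child x e hx1 he0 he9] at hvz
      simp only [Bool.and_eq_true, decide_eq_true_eq] at hvz
      obtain ⟨hdiff, hvx⟩ := hvz
      obtain ⟨s0, hs1, hs9, hsub, _⟩ :=
        ih x.toNat (by omega) x rfl hx1 (by omega) hvx
      have hed : (e = PySem.Int.mod x 10 - 1 ∧ 0 ≤ e) ∨
          (e = PySem.Int.mod x 10 + 1 ∧ e ≤ 9) := by omega
      have hzx : ∀ w ∈ genB k z, w ∈ genB k x := by
        rw [hxe]; exact genB_child_subset k x e hx1 (by omega) hed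
      refine ⟨s0, hs1, hs9, fun w hw => hsub _ (hzx w hw), fun _ => ?_⟩
      have hzz : z ∈ genB k z := by
        rw [genB_unfold, if_pos (⟨by omega, hk⟩ : 1 ≤ z ∧ z < k)]
        simp [hz10]
      exact hsub _ (hzx z hzz)

-- membership in the folded set of seed subtrees
theorem mem_foldl_update (k : Int) (l : List Int) (s : PySem.Set Int) (z : Int) :
    z ∈ l.foldl (fun s s0 => PySem.Set.update s (genB k s0)) s ↔
      z ∈ s ∨ ∃ s0 ∈ l, z ∈ genB k s0 := by
  induction l generalizing s with
  | nil => simp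
  | cons a l ihl =>
    simp only [List.foldl_cons, ihl, PySem.Set.mem_update, List.mem_cons]
    constructor
    · rintro ((h | h) | ⟨s0, hs0, hz⟩)
      · exact Or.inl h
      · exact Or.inr ⟨a, Or.inl rfl, h⟩
      · exact Or.inr ⟨s0, Or.inr hs0, hz⟩
    · rintro (h | ⟨s0, (rfl | hs0), hz⟩)
      · exact Or.inl (Or.inl h)
      · exact Or.inl (Or.inr hz)
      · exact Or.inr ⟨s0, hs0, hz⟩

-- A's fold is a filter by aCheck
theorem aFold_eq_filter (k : Int) (arr : List Int) (acc : List Int) :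
    arr.foldl (fun res i =>
      if i < k ∧ 10 ≤ i then
        if aCheck i then res ++ [i] else res
      else res) acc
    = acc ++ arr.filter (fun i => decide (i < k) && decide (10 ≤ i) && aCheck i) := by
  induction arr generalizing acc with
  | nil => simp
  | cons a l ihl =>
    simp only [List.foldl_cons, List.filter_cons]
    by_cases h1 : a < k ∧ 10 ≤ a
    · rw [if_pos h1]
      cases h2 : aCheck a with
      | true =>
        rw [if_pos rfl, ihl]
        simp [h1.1, h1.2]
      | false =>
        rw [if_neg (by simp [h2]), ihl]
        simp
    · rw [if_neg h1]
      have hb : (decide (a < k) && decide (10 ≤ a) && aCheck a) = false := by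
        rcases not_and_or.mp h1 with h | h <;> simp [h]
      rw [ihl, hb]
      simp

-- the pointwise agreement of the two membership tests
theorem valid_iff (k i : Int) :
    (decide (i < k) && decide (10 ≤ i) && aCheck i) =
      PySem.Set.contains
        ((PySem.List.pyRange 1 10 1).foldl
          (fun s s0 => PySem.Set.update s (genB k s0)) PySem.Set.empty) i := by
  have hrange : PySem.List.pyRange 1 10 1 = [1, 2, 3, 4, 5, 6, 7, 8, 9] := by decide
  by_cases hm : i ∈ (PySem.List.pyRange 1 10 1).foldl
      (fun s s0 => PySem.Set.update s (genB k s0)) PySem.Set.empty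
  · rw [(PySem.Set.contains_iff _ _).mpr hm]
    rcases (mem_foldl_update k _ _ i).mp hm with h | ⟨s0, hs0, hmem⟩
    · exact absurd h (by simp [PySem.Set.empty])
    · have hs0' : 1 ≤ s0 ∧ s0 ≤ 9 := by
        rw [hrange] at hs0; simp at hs0; omega
      have hz := genB_sound k s0 hs0'.1 (aCheck_single s0 hs0'.1 hs0'.2) i hmem
      simp [hz.1, hz.2.1, hz.2.2]
  · have hc : PySem.Set.contains ((PySem.List.pyRange 1 10 1).foldl
        (fun s s0 => PySem.Set.update s (genB k s0)) PySem.Set.empty) i = false := by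
      cases hb : PySem.Set.contains ((PySem.List.pyRange 1 10 1).foldl
          (fun s s0 => PySem.Set.update s (genB k s0)) PySem.Set.empty) i
      · rfl
      · exact absurd ((PySem.Set.contains_iff _ _).mp hb) hm
    rw [hc]
    by_cases h1 : i < k ∧ 10 ≤ i
    · cases h2 : aCheck i with
      | false => simp
      | true =>
        exfalso
        obtain ⟨s0, hs1, hs9, _, hmem⟩ :=
          genB_complete k i.toNat i rfl (by omega) h1.1 h2
        refine hm ((mem_foldl_update k _ _ i).mpr (Or.inr ⟨s0, ?_, hmem h1.2⟩))
        rw [hrange]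
        simp
        omega
    · rcases not_and_or.mp h1 with h | h <;> simp [h]

-- ===== VERDICT (by name: the statement is the Claim_ definition above) =====
theorem getDigitDiff1AndLessK_spec : Claim_equal_getDigitDiff1AndLessK := by
  intro arr k _
  show getDigitDiff1AndLessK arr k = getDigitDiff1AndLessK_alt arr k
  unfold getDigitDiff1AndLessK getDigitDiff1AndLessK_alt
  rw [aFold_eq_filter]
  simp only [List.nil_append]
  exact List.filter_congr (fun i _ => by rw [valid_iff])
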